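-- pv_equiv track=rewrite | github.com/hazard-venom/IRIS | iris_client.py | summarize_objects
-- ===== SOURCE A (Python) =====
-- def summarize_objects(objects):
--     if not objects:
--         return "I do not detect any known object right now."
--
--     position_order = ("left", "center", "right")
--     grouped = {position: {} for position in position_order}
--
--     for obj in objects:
--         position = obj.get("position", "center")
--         name = obj.get("object", "object")
--         grouped.setdefault(position, {})
--         grouped[position][name] = grouped[position].get(name, 0) + 1
--
--     parts = []
--
--     for position in position_order:
--         counts = grouped.get(position, {})
--         if not counts:
--             continue
--
--         labels = []
--         for name, count in sorted(counts.items()):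
--             if count == 1:
--                 labels.append(name)
--             else:
--                 labels.append(f"{count} {name}s")
--
--         parts.append(f"{position}: " + ", ".join(labels))
--
--     return "I can describe your surroundings. " + "; ".join(parts) + "."
-- ===== SOURCE B (Python) =====
-- def label(name, count):
--     return name if count == 1 else f"{count} {name}s"
--
--
-- def summarize_objects(objects):
--     objects = list(objects)
--     if not objects:
--         return "I do not detect any known object right now."
--
--     parts = []
--     for position in ("left", "center", "right"):
--         names = [o.get("object", "object") for o in objects
--                  if o.get("position", "center") == position]
--         if names:
--             labels = [label(name, names.count(name)) for name in sorted(set(names))]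
--             parts.append(position + ": " + ", ".join(labels))
--
--     return "I can describe your surroundings. " + "; ".join(parts) + "."
-- ===== Notes on version B (the rewrite author's own statement) =====
-- stated objective: alternative
-- what changed: A builds a nested dict-of-dicts index in one pass and walks it back per position, sorting count-dict items; B uses no dict at all: per position it extracts the matching name list by a filtering comprehension, iterates sorted(set(names)) and reads each count off with names.count(name).
import Mathlib
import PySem

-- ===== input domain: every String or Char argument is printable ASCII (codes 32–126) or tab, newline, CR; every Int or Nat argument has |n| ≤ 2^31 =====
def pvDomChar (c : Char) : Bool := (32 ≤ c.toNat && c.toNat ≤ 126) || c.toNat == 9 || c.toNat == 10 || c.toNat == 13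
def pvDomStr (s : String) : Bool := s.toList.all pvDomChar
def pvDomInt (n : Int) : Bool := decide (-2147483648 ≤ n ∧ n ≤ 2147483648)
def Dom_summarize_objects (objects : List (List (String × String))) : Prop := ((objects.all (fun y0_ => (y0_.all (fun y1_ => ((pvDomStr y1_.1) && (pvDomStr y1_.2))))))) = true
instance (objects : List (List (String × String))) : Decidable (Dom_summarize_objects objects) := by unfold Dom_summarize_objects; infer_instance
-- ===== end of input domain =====

-- B drops A's dict machinery entirely: per position it filters out the matching
-- name list and reads counts off with names.count over sorted(set(names)).

-- ===== PORT A =====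
-- the body of A's grouping loop, named so the invariant lemma below can cite it;
-- grouped[position] right after setdefault is rendered with getD (the key is
-- always present there, so this is exact), and the if/else around labels.append
-- is rendered as appending an 'if' expression (same appended value)
def pvStepA (g : PySem.Dict String (PySem.Dict String Int)) (obj : List (String × String)) :
    PySem.Dict String (PySem.Dict String Int) :=
  let position := (PySem.Dict.mk obj).getD "position" "center"
  let name := (PySem.Dict.mk obj).getD "object" "object"
  let g := g.setdefault position (PySem.Dict.mk [])
  let inner := g.getD position (PySem.Dict.mk [])
  g.insert position (inner.insert name (inner.getD name 0 + 1))

def summarize_objects (objects : List (List (String × String))) : String :=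
  if objects = [] then "I do not detect any known object right now."
  else
    let position_order : List String := ["left", "center", "right"]
    let grouped : PySem.Dict String (PySem.Dict String Int) :=
      position_order.foldl (fun g p => g.insert p (PySem.Dict.mk [])) (PySem.Dict.mk [])
    let grouped := objects.foldl pvStepA grouped
    let parts := position_order.foldl (fun parts position =>
      let counts := grouped.getD position (PySem.Dict.mk [])
      if counts.items = [] then parts
      else
        let labels := (PySem.List.sorted2 counts.items (fun p => p.1) (fun p => p.2)).foldl
          (fun labels nc =>
            labels ++ [if nc.2 == 1 then nc.1 else PySem.Int.toStr nc.2 ++ " " ++ nc.1 ++ "s"]) []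
        parts ++ [position ++ ": " ++ PySem.Str.join ", " labels]) []
    "I can describe your surroundings. " ++ PySem.Str.join "; " parts ++ "."

-- ===== PORT B =====
-- Source B's helper 'label(name, count)'
def pvLabel (name : String) (count : Int) : String :=
  if count == 1 then name else PySem.Int.toStr count ++ " " ++ name ++ "s"

-- Source B's comprehension 'names = [o.get("object","object") for o in objects if o.get("position","center") == position]'
def pvNames (objects : List (List (String × String))) (position : String) : List String :=
  (objects.filter (fun o => (PySem.Dict.mk o).getD "position" "center" == position)).map
    (fun o => (PySem.Dict.mk o).getD "object" "object")

def summarize_objects_alt (objects : List (List (String × String))) : String :=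
  if objects = [] then "I do not detect any known object right now."
  else
    let parts := ["left", "center", "right"].foldl (fun parts position =>
      let names := pvNames objects position
      if names = [] then parts
      else
        let labels := (PySem.List.sorted (PySem.Set.ofList names) (fun n => n)).map
          (fun name => pvLabel name ((PySem.List.count names name : Nat) : Int))
        parts ++ [position ++ ": " ++ PySem.Str.join ", " labels]) []
    "I can describe your surroundings. " ++ PySem.Str.join "; " parts ++ "."

-- ===== PRECONDITION & SPEC =====
def Spec_summarize_objects (objects : List (List (String × String))) (out : String) : Prop := out = summarize_objects_alt objects
instance (objects : List (List (String × String))) (out : String) : Decidable (Spec_summarize_objects objects out) := by unfold Spec_summarize_objects; infer_instance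

-- ===== CLAIM (what is proved, stated in full; the proofs are below) =====
def Claim_equal_summarize_objects : Prop := ∀ (objects : List (List (String × String))), Dom_summarize_objects objects → Spec_summarize_objects objects (summarize_objects objects)

-- ===== LEMMAS AND PROOFS =====

-- A's per-position counting loop, distilled from pvStepA by the invariant pv_inv
def pvStepB (position : String) (d : PySem.Dict String Int) (obj : List (String × String)) :
    PySem.Dict String Int :=
  if (PySem.Dict.mk obj).getD "position" "center" == position then
    let name := (PySem.Dict.mk obj).getD "object" "object"
    d.insert name (d.getD name 0 + 1)
  else d

-- the grouping invariant: at any position already present in g, A's dict-of-dicts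
-- loop acts exactly like a per-position counting loop started from g's entry for it
lemma pv_inv (objs : List (List (String × String))) (p : String) :
    ∀ g : PySem.Dict String (PySem.Dict String Int), g.contains p = true →
    (objs.foldl pvStepA g).getD p (PySem.Dict.mk []) =
      objs.foldl (pvStepB p) (g.getD p (PySem.Dict.mk [])) := by
  induction objs with
  | nil => intro g _; rfl
  | cons o t ih =>
    intro g hg
    simp only [List.foldl_cons]
    have hc1 : (pvStepA g o).contains p = true := by
      unfold pvStepA
      simp only [PySem.Dict.contains_insert, PySem.Dict.contains_setdefault, hg]
      simp
    rw [ih _ hc1]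
    congr 1
    unfold pvStepA pvStepB
    by_cases h : (PySem.Dict.mk o).getD "position" "center" = p
    · rw [h]
      simp only [beq_self_eq_true, if_true]
      rw [PySem.Dict.setdefault, if_pos hg, PySem.Dict.getD_insert_self]
    · have hb : ((PySem.Dict.mk o).getD "position" "center" == p) = false := by
        simpa using h
      simp only [hb, Bool.false_eq_true, if_false]
      rw [PySem.Dict.getD_insert_of_ne _ _ _ (Ne.symm h)]
      rw [PySem.Dict.getD, PySem.Dict.get?_setdefault_of_ne _ _ (Ne.symm h), ← PySem.Dict.getD]

-- the initial grouped dict {left:{}, center:{}, right:{}}, named for the proof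
def pvG0 : PySem.Dict String (PySem.Dict String Int) :=
  (["left", "center", "right"] : List String).foldl
    (fun g p => g.insert p (PySem.Dict.mk [])) (PySem.Dict.mk [])

-- A's final per-position dict is the per-position counting loop, at the three positions
lemma pv_counts (objs : List (List (String × String))) (p : String)
    (hp : p = "left" ∨ p = "center" ∨ p = "right") :
    (objs.foldl pvStepA pvG0).getD p (PySem.Dict.mk []) =
      objs.foldl (pvStepB p) (PySem.Dict.mk []) := by
  have hc : pvG0.contains p = true := by rcases hp with h | h | h <;> rw [h] <;> decide
  rw [pv_inv objs p pvG0 hc]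
  congr 1
  rcases hp with h | h | h <;> rw [h] <;> decide

-- the per-position counting loop is Counter(names) over B's filtered name list
lemma pv_counter (objs : List (List (String × String))) (p : String) :
    objs.foldl (pvStepB p) (PySem.Dict.mk []) = PySem.Dict.counter (pvNames objs p) := by
  unfold pvStepB pvNames
  rw [PySem.List.foldl_if_eq_foldl_filter
    (f := fun (d : PySem.Dict String Int) (o : List (String × String)) =>
      d.insert ((PySem.Dict.mk o).getD "object" "object")
        (d.getD ((PySem.Dict.mk o).getD "object" "object") 0 + 1))]
  rw [← PySem.Dict.foldl_insert_getD_add_one_eq_counter, List.foldl_map]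
  rfl

-- insertBy only looks at comparisons of the inserted element with list members
lemma pv_insertBy_congr {α : Type} (b b' : α → α → Bool) (x : α) (ys : List α)
    (h : ∀ y ∈ ys, b x y = b' x y) :
    PySem.List.insertBy b x ys = PySem.List.insertBy b' x ys := by
  induction ys with
  | nil => simp [PySem.List.insertBy]
  | cons y t ih =>
    have e : ∀ (c : α → α → Bool), PySem.List.insertBy c x (y :: t) =
        if c x y then x :: y :: t else y :: PySem.List.insertBy c x t := by
      intro c; simp [PySem.List.insertBy]
    rw [e, e, h y (by simp)]
    split_ifs with hb
    · rfl
    · rw [ih (fun z hz => h z (by simp [hz]))]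

-- on a list whose primary keys are pairwise distinct, the tuple-key sort is the
-- primary-key sort (the tie-breaker key is never consulted)
lemma pv_sorted2_eq_sorted {α κ₁ κ₂ : Type} [LinearOrder κ₁] [LinearOrder κ₂]
    (k1 : α → κ₁) (k2 : α → κ₂) (xs : List α) (h : (xs.map k1).Nodup) :
    PySem.List.sorted2 xs k1 k2 = PySem.List.sorted xs k1 := by
  suffices H : ∀ (l acc : List α), ((acc ++ l).map k1).Nodup →
      l.foldl (fun acc x => PySem.List.insertBy
        (fun a b => decide (k1 a < k1 b) || (!decide (k1 b < k1 a) && decide (k2 a < k2 b))) x acc) acc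
      = l.foldl (fun acc x => PySem.List.insertBy (fun a b => decide (k1 a < k1 b)) x acc) acc by
    simpa [PySem.List.sorted2, PySem.List.sorted] using H xs [] (by simpa using h)
  intro l
  induction l with
  | nil => intro acc _; rfl
  | cons x t ih =>
    intro acc hn
    simp only [List.foldl_cons]
    have hne : ∀ y ∈ acc, k1 x ≠ k1 y := by
      intro y hy hxy
      have : (acc.map k1 ++ (x :: t).map k1).Nodup := by simpa using hn
      rcases List.nodup_append.mp this with ⟨_, _, hdisj⟩
      exact hdisj (k1 y) (List.mem_map_of_mem hy) (k1 x) (by simp) hxy.symm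
    have hstep : PySem.List.insertBy
        (fun a b => decide (k1 a < k1 b) || (!decide (k1 b < k1 a) && decide (k2 a < k2 b))) x acc
        = PySem.List.insertBy (fun a b => decide (k1 a < k1 b)) x acc := by
      apply pv_insertBy_congr
      intro y hy
      rcases lt_or_gt_of_ne (hne y hy) with hlt | hgt
      · simp [hlt, not_lt.mpr hlt.le]
      · simp [hgt, not_lt.mpr hgt.le]
    rw [hstep]
    apply ih
    have hperm : ((PySem.List.insertBy (fun a b => decide (k1 a < k1 b)) x acc ++ t).map k1).Perm
        ((acc ++ x :: t).map k1) :=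
      List.Perm.map k1 (((PySem.List.insertBy_perm _ x acc).append_right t).trans
        List.perm_middle.symm)
    exact hperm.nodup_iff.mpr hn

-- ofList [] is [] and ofList of a nonempty list is nonempty
lemma pv_ofList_eq_nil_iff (names : List String) :
    PySem.Set.ofList names = [] ↔ names = [] := by
  constructor
  · intro h
    cases names with
    | nil => rfl
    | cons a t =>
      exact absurd h (List.ne_nil_of_mem ((PySem.Set.mem_ofList _ a).mpr (by simp)))
  · intro h; subst h; rfl

-- the whole per-position branch of A equals the per-position branch of B
lemma pv_branch (objs : List (List (String × String))) (p : String)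
    (hp : p = "left" ∨ p = "center" ∨ p = "right") (acc : List String) :
    (let counts := (objs.foldl pvStepA pvG0).getD p (PySem.Dict.mk [])
     if counts.items = [] then acc
     else
       let labels := (PySem.List.sorted2 counts.items (fun q => q.1) (fun q => q.2)).foldl
         (fun labels nc =>
           labels ++ [if nc.2 == 1 then nc.1 else PySem.Int.toStr nc.2 ++ " " ++ nc.1 ++ "s"]) []
       acc ++ [p ++ ": " ++ PySem.Str.join ", " labels])
    = (let names := pvNames objs p
       if names = [] then acc
       else
         let labels := (PySem.List.sorted (PySem.Set.ofList names) (fun n => n)).map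
           (fun name => pvLabel name ((PySem.List.count names name : Nat) : Int))
         acc ++ [p ++ ": " ++ PySem.Str.join ", " labels]) := by
  rw [pv_counts objs p hp, pv_counter objs p]
  set names := pvNames objs p with hnames
  simp only [PySem.Dict.items_counter]
  by_cases h : names = []
  · simp [h]
  · have hset : PySem.Set.ofList names ≠ [] := fun hc => h ((pv_ofList_eq_nil_iff names).mp hc)
    have hmap : (PySem.Set.ofList names).map
        (fun k => (k, (List.count k names : Int))) ≠ [] := by
      simpa using hset
    simp only [h, hmap, if_false]
    congr 2
    rw [pv_sorted2_eq_sorted]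
    · rw [PySem.List.sorted_eq_of_perm_of_pairwise_lt
        (ys := (PySem.List.sorted (PySem.Set.ofList names) (fun n => n)).map
          (fun k => (k, (List.count k names : Int))))]
      · rw [PySem.List.foldl_append_singleton_eq_map, List.nil_append, List.map_map]
        congr 2

      · exact (PySem.List.sorted_perm _ _ _).map _
      · rw [List.pairwise_map]
        exact PySem.List.sorted_ofList_pairwise_lt names
    · rw [List.map_map]
      have : ((fun (q : String × Int) => q.1) ∘ fun k => (k, (List.count k names : Int)))
          = fun k => k := rfl
      rw [this]
      simp [PySem.Set.nodup_ofList names]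

-- ===== VERDICT (by name: the statement is the Claim_ definition above) =====
theorem summarize_objects_spec : Claim_equal_summarize_objects := by
  intro objects _
  unfold Spec_summarize_objects summarize_objects summarize_objects_alt
  by_cases h : objects = []
  · simp [h]
  · simp only [h, if_false]
    congr 2
    congr 1
    apply PySem.List.foldl_congr_mem'
    intro p hp acc
    have hp' : p = "left" ∨ p = "center" ∨ p = "right" := by simpa using hp
    exact pv_branch objects p hp' acc
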